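-- pv_equiv track=rewrite | github.com/lachimex/WDI | do_kolokwium5.py | zadanie
-- ===== SOURCE A (Python) =====
-- def zamiana_4(n):
--     liczba = 0
--     i = 0
--     while n > 0:
--         liczba += (n % 4) * 10**i
--         i += 1
--         n //= 4
--     return liczba
--
-- def cztero_zgodne(a, b):
--     a_4 = zamiana_4(a)
--     b_4 = zamiana_4(b)
--     t1 = [False] * 4
--     t2 = [False] * 4
--     while a_4 != 0:
--         t1[a_4 % 10] = True
--         a_4 //= 10
--     while b_4 != 0:
--         t2[b_4 % 10] = True
--         b_4 //= 10
--     return t1 == t2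
--
-- def zadanie(t):
--     n = len(t)
--     counter = 1
--     longest = 0
--     for i in range(n):
--         for j in range(i + 1, n):
--             if cztero_zgodne(t[i], t[j]):
--                 counter += 1
--         longest = max(longest, counter)
--         counter = 1
--     return longest
-- ===== SOURCE B (Python) =====
-- def zadanie(t):
--     counts = {}
--     for x in t:
--         n = x
--         sig = [False] * 4
--         while n > 0:
--             sig[n % 4] = True
--             n //= 4
--         key = tuple(sig)
--         counts[key] = counts.get(key, 0) + 1
--     best = 0
--     for v in counts.values():
--         if v > best:
--             best = v
--     return best
-- ===== Notes on version B (the rewrite author's own statement) =====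
-- stated objective: faster
-- what changed: B replaces A's O(n^2) all-pairs digit-set comparison by a single pass that tallies each element's base-4 digit-set signature in a dict and returns the maximal tally.
import Mathlib
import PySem

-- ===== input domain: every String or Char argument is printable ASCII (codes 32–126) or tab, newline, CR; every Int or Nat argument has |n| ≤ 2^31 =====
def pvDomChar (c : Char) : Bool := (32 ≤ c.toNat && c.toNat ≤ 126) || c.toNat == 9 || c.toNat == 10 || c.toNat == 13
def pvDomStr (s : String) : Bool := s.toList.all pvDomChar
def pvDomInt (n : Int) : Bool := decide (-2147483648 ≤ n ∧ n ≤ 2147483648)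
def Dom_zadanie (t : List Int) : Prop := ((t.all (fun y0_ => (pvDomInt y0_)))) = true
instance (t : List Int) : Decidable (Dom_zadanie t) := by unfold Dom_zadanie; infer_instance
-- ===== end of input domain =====

-- B replaces A's quadratic pairwise comparison by a single pass tallying each element's
-- base-4 digit-set signature in a dict and returning the maximal tally (objective: faster).

-- ===== PORT A =====
-- while n > 0: liczba += (n % 4) * 10**i; i += 1; n //= 4   (i is a loop counter from 0, kept as Nat)
def zamiana_4_go (n liczba : Int) (i : Nat) : Int :=
  if _h : n > 0 then
    zamiana_4_go (PySem.Int.floordiv n 4) (liczba + PySem.Int.mod n 4 * 10 ^ i) (i + 1)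
  else liczba
termination_by n.toNat
decreasing_by
  rw [PySem.Int.floordiv_eq_ediv_of_pos (by norm_num)]; omega

def zamiana_4 (n : Int) : Int := zamiana_4_go n 0 0

-- while a_4 != 0: t[a_4 % 10] = True; a_4 //= 10.  a_4 is always an output of zamiana_4,
-- hence ≥ 0, so the Python test 'a_4 != 0' is 'a_4 > 0' there (totality guard; on a_4 < 0 the
-- Python loop would not terminate).  Every decimal digit of a_4 is a base-4 digit 0..3, so the
-- index a_4 % 10 is in range and '.toNat' is exact.
def digits_mark (t : List Bool) (m : Int) : List Bool :=
  if _h : m > 0 then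
    digits_mark (t.set (PySem.Int.mod m 10).toNat true) (PySem.Int.floordiv m 10)
  else t
termination_by m.toNat
decreasing_by
  rw [PySem.Int.floordiv_eq_ediv_of_pos (by norm_num)]; omega

def cztero_zgodne (a b : Int) : Bool :=
  let a_4 := zamiana_4 a
  let b_4 := zamiana_4 b
  let t1 := digits_mark [false, false, false, false] a_4
  let t2 := digits_mark [false, false, false, false] b_4
  t1 == t2

def zadanie (t : List Int) : Int :=
  let n : Int := t.length
  (PySem.List.pyRange 0 n 1).foldl (fun longest i =>
    let counter := (PySem.List.pyRange (i + 1) n 1).foldl (fun counter j =>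
      if cztero_zgodne (PySem.List.pyGetD t i 0) (PySem.List.pyGetD t j 0) then counter + 1
      else counter) 1
    max longest counter) 0

-- ===== PORT B =====
-- while n > 0: sig[n % 4] = True; n //= 4   (n % 4 is in 0..3, so '.toNat' on the index is exact)
def sig_loop (sig : List Bool) (n : Int) : List Bool :=
  if _h : n > 0 then
    sig_loop (sig.set (PySem.Int.mod n 4).toNat true) (PySem.Int.floordiv n 4)
  else sig
termination_by n.toNat
decreasing_by
  rw [PySem.Int.floordiv_eq_ediv_of_pos (by norm_num)]; omega

-- the Python dict key tuple(sig) is the 4-element list sig itself, represented as List Bool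
def zadanie_alt (t : List Int) : Int :=
  let counts := t.foldl (fun counts x =>
    let key := sig_loop [false, false, false, false] x
    counts.insert key (counts.getD key 0 + 1)) PySem.Dict.empty
  counts.values.foldl (fun best v => if v > best then v else best) 0

-- ===== PRECONDITION & SPEC =====
def Spec_zadanie (t : List Int) (out : Int) : Prop := out = zadanie_alt t
instance (t : List Int) (out : Int) : Decidable (Spec_zadanie t out) := by unfold Spec_zadanie; infer_instance

-- ===== CLAIM (what is proved, stated in full; the proofs are below) =====
def Claim_equal_zadanie : Prop := ∀ (t : List Int), Dom_zadanie t → Spec_zadanie t (zadanie t)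

-- ===== LEMMAS AND PROOFS =====

-- the base-4 signature of an integer, as B computes it
def pvSig (x : Int) : List Bool := sig_loop [false, false, false, false] x

-- clean form of zamiana_4: the decimal encoding of the base-4 digits
def pvEnc (n : Int) : Int :=
  if _h : n > 0 then PySem.Int.mod n 4 + 10 * pvEnc (PySem.Int.floordiv n 4) else 0
termination_by n.toNat
decreasing_by
  rw [PySem.Int.floordiv_eq_ediv_of_pos (by norm_num)]; omega

theorem pvEnc_nonneg (n : Int) : 0 ≤ pvEnc n := by
  induction n using pvEnc.induct with
  | case1 n h ih =>
    rw [pvEnc, dif_pos h]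
    have h4 : (0:Int) < 4 := by norm_num
    have := PySem.Int.mod_eq_emod_of_pos (a := n) h4
    omega
  | case2 n h => rw [pvEnc, dif_neg h]

theorem pvEnc_pos {n : Int} (h : 0 < n) : 0 < pvEnc n := by
  induction n using pvEnc.induct with
  | case1 n hn ih =>
    rw [pvEnc, dif_pos hn]
    have h4 : (0:Int) < 4 := by norm_num
    have hm := PySem.Int.mod_eq_emod_of_pos (a := n) h4
    have hd := PySem.Int.floordiv_eq_ediv_of_pos (a := n) h4
    by_cases hq : 0 < PySem.Int.floordiv n 4
    · have := ih hq
      omega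
    · have : PySem.Int.mod n 4 > 0 := by omega
      have := pvEnc_nonneg (PySem.Int.floordiv n 4)
      omega
  | case2 n hn => omega

theorem zamiana_4_go_eq (n liczba : Int) (i : Nat) :
    zamiana_4_go n liczba i = liczba + 10 ^ i * pvEnc n := by
  induction n, liczba, i using zamiana_4_go.induct with
  | case1 n liczba i h ih =>
    have henc : pvEnc n = PySem.Int.mod n 4 + 10 * pvEnc (PySem.Int.floordiv n 4) := by
      rw [pvEnc, dif_pos h]
    rw [zamiana_4_go, dif_pos h, ih, henc]
    ring
  | case2 n liczba i h => rw [zamiana_4_go, dif_neg h, pvEnc, dif_neg h]; ring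

theorem zamiana_4_eq (n : Int) : zamiana_4 n = pvEnc n := by
  simpa using zamiana_4_go_eq n 0 0

theorem digits_mark_enc (n : Int) (t : List Bool) :
    digits_mark t (pvEnc n) = sig_loop t n := by
  induction n using pvEnc.induct generalizing t with
  | case1 n hn ih =>
    have h4 : (0:Int) < 4 := by norm_num
    have h10 : (0:Int) < 10 := by norm_num
    have hm := PySem.Int.mod_eq_emod_of_pos (a := n) h4
    have henc : pvEnc n = PySem.Int.mod n 4 + 10 * pvEnc (PySem.Int.floordiv n 4) := by
      rw [pvEnc, dif_pos hn]
    have he0 : 0 ≤ pvEnc (PySem.Int.floordiv n 4) := pvEnc_nonneg _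
    have hpos : pvEnc n > 0 := pvEnc_pos hn
    rw [digits_mark, dif_pos hpos]
    have hmod : PySem.Int.mod (pvEnc n) 10 = PySem.Int.mod n 4 := by
      rw [PySem.Int.mod_eq_emod_of_pos h10, henc]
      omega
    have hdiv : PySem.Int.floordiv (pvEnc n) 10 = pvEnc (PySem.Int.floordiv n 4) := by
      rw [PySem.Int.floordiv_eq_ediv_of_pos h10, henc]
      omega
    rw [hmod, hdiv, ih]
    conv_rhs => rw [sig_loop]
    rw [dif_pos hn]
  | case2 n hn =>
    rw [pvEnc, dif_neg hn, digits_mark, dif_neg (by omega), sig_loop, dif_neg hn]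

theorem cztero_zgodne_eq_sig (a b : Int) :
    cztero_zgodne a b = (pvSig a == pvSig b) := by
  simp [cztero_zgodne, zamiana_4_eq, digits_mark_enc, pvSig]

-- list of the values A's outer loop takes the max of: 1 + (#later positions with equal signature)
def pvVals : List (List Bool) → List Int
  | [] => []
  | s :: r => (1 + (r.count s : Int)) :: pvVals r

theorem mem_pvVals {l : List (List Bool)} {v : Int} (h : v ∈ pvVals l) :
    ∃ pre s r, l = pre ++ s :: r ∧ v = 1 + (r.count s : Int) := by
  induction l with
  | nil => simp [pvVals] at h
  | cons x xs ih =>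
    rw [pvVals] at h
    rcases List.mem_cons.mp h with h1 | h1
    · exact ⟨[], x, xs, by simp, h1⟩
    · obtain ⟨pre, s, r, hl, hv⟩ := ih h1
      exact ⟨x :: pre, s, r, by simp [hl], hv⟩

theorem pvVals_mem (pre : List (List Bool)) (s : List Bool) (r : List (List Bool)) :
    (1 + (r.count s : Int)) ∈ pvVals (pre ++ s :: r) := by
  induction pre with
  | nil => rw [List.nil_append, pvVals]; exact List.mem_cons_self
  | cons x xs ih => rw [List.cons_append, pvVals]; exact List.mem_cons_of_mem _ ih

theorem first_occ {s : List Bool} {l : List (List Bool)} (h : s ∈ l) :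
    ∃ pre r, l = pre ++ s :: r ∧ s ∉ pre := by
  induction l with
  | nil => simp at h
  | cons x xs ih =>
    by_cases hx : s = x
    · exact ⟨[], xs, by simp [hx], by simp⟩
    · rcases List.mem_cons.mp h with h1 | h1
      · exact absurd h1 hx
      · obtain ⟨pre, r, hl, hnp⟩ := ih h1
        exact ⟨x :: pre, r, by simp [hl], by simp [hnp, Ne.symm, hx]⟩

theorem count_sig_eq (x : Int) (xs : List Int) :
    xs.countP (fun y => cztero_zgodne x y) = (xs.map pvSig).count (pvSig x) := by
  rw [List.count, List.countP_map]
  apply List.countP_congr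
  intro y _
  simp only [Function.comp_apply]
  rw [cztero_zgodne_eq_sig]
  simp only [beq_iff_eq]
  exact eq_comm

theorem inner_eq (t : List Int) (i : Int) (hi : 0 ≤ i) (a : Int) :
    (PySem.List.pyRange (i + 1) (t.length : Int) 1).foldl (fun c j =>
        if cztero_zgodne a (PySem.List.pyGetD t j 0) then c + 1 else c) 1
      = 1 + ((t.drop (i + 1).toNat).countP (fun y => cztero_zgodne a y) : Int) := by
  rw [PySem.List.foldl_pyRange_pyGetD' t 0 (fun c y => if cztero_zgodne a y then c + 1 else c) 1
        (a := i + 1) (by omega), PySem.List.foldl_if_add_one]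

theorem outer_go (t : List Int) (a : Int) :
    (List.range t.length).foldl (fun longest k =>
        max longest (1 + (((t.drop (k + 1)).countP (fun y => cztero_zgodne (t.getD k 0) y) : Nat) : Int))) a
      = (pvVals (t.map pvSig)).foldl max a := by
  induction t generalizing a with
  | nil => rfl
  | cons x xs ih =>
    rw [List.length_cons, List.range_succ_eq_map, List.foldl_cons, List.foldl_map]
    simp only [List.drop_succ_cons, List.drop_zero, List.getD_cons_zero, List.getD_cons_succ,
      Nat.succ_eq_add_one]
    rw [ih, List.map_cons, pvVals, List.foldl_cons, count_sig_eq]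

theorem zadanie_eq_vals (t : List Int) :
    zadanie t = (pvVals (t.map pvSig)).foldl max 0 := by
  show (PySem.List.pyRange 0 (t.length : Int) 1).foldl (fun longest i =>
      max longest ((PySem.List.pyRange (i + 1) (t.length : Int) 1).foldl (fun counter j =>
        if cztero_zgodne (PySem.List.pyGetD t i 0) (PySem.List.pyGetD t j 0) then counter + 1
        else counter) 1)) 0 = _
  rw [PySem.List.pyRange_one]
  simp only [Int.sub_zero, Int.toNat_natCast, zero_add]
  rw [List.foldl_map]
  rw [PySem.List.foldl_congr_mem (g := fun longest (k : Nat) =>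
      max longest (1 + (((t.drop (k + 1)).countP (fun y => cztero_zgodne (t.getD k 0) y) : Nat) : Int)))]
  · exact outer_go t 0
  · intro acc k _
    rw [inner_eq t (k : Int) (by omega)]
    simp only [PySem.List.pyGetD_natCast]
    have hk : ((k : Int) + 1).toNat = k + 1 := by omega
    rw [hk]

theorem zadanie_alt_eq_counts (t : List Int) :
    zadanie_alt t =
      ((PySem.Set.ofList (t.map pvSig)).map (fun s => ((t.map pvSig).count s : Int))).foldl max 0 := by
  have h1 : t.foldl (fun (counts : PySem.Dict (List Bool) Int) x =>
      counts.insert (pvSig x) (counts.getD (pvSig x) 0 + 1)) PySem.Dict.empty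
      = PySem.Dict.counter (t.map pvSig) := by
    rw [← PySem.Dict.foldl_insert_getD_add_one_eq_counter, List.foldl_map]
  have h2 : (PySem.Dict.counter (t.map pvSig)).values
      = (PySem.Set.ofList (t.map pvSig)).map (fun s => ((t.map pvSig).count s : Int)) := by
    show (PySem.Dict.counter (t.map pvSig)).items.map (·.2) = _
    rw [PySem.Dict.items_counter, List.map_map]
    rfl
  have h3 : ∀ (init : Int) (xs : List Int),
      xs.foldl (fun best v => if v > best then v else best) init = xs.foldl max init := by
    intro init xs
    induction xs generalizing init with
    | nil => rfl
    | cons b bs ih =>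
      simp only [List.foldl_cons, ih]
      congr 1
      split <;> omega
  show ((t.foldl (fun (counts : PySem.Dict (List Bool) Int) x =>
      counts.insert (pvSig x) (counts.getD (pvSig x) 0 + 1)) PySem.Dict.empty).values).foldl
      (fun best v => if v > best then v else best) 0 = _
  rw [h1, h2, h3]

theorem vals_max_eq_counts_max (l : List (List Bool)) :
    (pvVals l).foldl max 0 = ((PySem.Set.ofList l).map (fun s => (l.count s : Int))).foldl max 0 := by
  apply le_antisymm
  · rcases PySem.List.foldl_max_mem (pvVals l) 0 with h | h
    · rw [h]; exact (PySem.List.le_foldl_max _ 0).1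
    · obtain ⟨pre, s, r, hl, hv⟩ := mem_pvVals h
      have hs : s ∈ PySem.Set.ofList l := by
        rw [PySem.Set.mem_ofList, hl]; simp
      have h2 := (PySem.List.le_foldl_max ((PySem.Set.ofList l).map fun s => (l.count s : Int)) 0).2
        _ (List.mem_map_of_mem hs)
      have hc : (pvVals l).foldl max 0 ≤ (l.count s : Int) := by
        rw [hv, hl, List.count_append, List.count_cons_self]
        push_cast
        omega
      exact hc.trans h2
  · rcases PySem.List.foldl_max_mem ((PySem.Set.ofList l).map fun s => (l.count s : Int)) 0 with h | h
    · rw [h]; exact (PySem.List.le_foldl_max _ 0).1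
    · obtain ⟨s, hsmem, hv⟩ := List.mem_map.mp h
      have hsl : s ∈ l := (PySem.Set.mem_ofList l s).mp hsmem
      obtain ⟨pre, r, hl, hnp⟩ := first_occ hsl
      have h2 := (PySem.List.le_foldl_max (pvVals l) 0).2 _ (hl ▸ pvVals_mem pre s r)
      have hcount : l.count s = 1 + r.count s := by
        rw [hl, List.count_append, List.count_cons_self, List.count_eq_zero.mpr hnp]
        omega
      rw [← hv, hcount]
      push_cast
      push_cast at h2
      omega

-- ===== VERDICT (by name: the statement is the Claim_ definition above) =====
theorem zadanie_spec : Claim_equal_zadanie := by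
  intro t _
  unfold Spec_zadanie
  rw [zadanie_eq_vals, zadanie_alt_eq_counts, vals_max_eq_counts_max]
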